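-- pv_equiv track=rewrite | github.com/zeno1030/CodingTest | programmers/route.py | solution
-- ===== SOURCE A (Python) =====
-- def solution(N, a, b):
--     class UnionFind:
--         def __init__(self, n):
--             self.parent = list(range(n))
--             self.rank = [1] * n
--
--         def find(self, x):
--             if self.parent[x] != x:
--                 self.parent[x] = self.find(self.parent[x])
--             return self.parent[x]
--
--         def union(self, x, y):
--             rootX = self.find(x)
--             rootY = self.find(y)
--             if rootX != rootY:
--                 if self.rank[rootX] > self.rank[rootY]:
--                     self.parent[rootY] = rootX
--                 elif self.rank[rootX] < self.rank[rootY]: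
--                     self.parent[rootX] = rootY
--                 else:
--                     self.parent[rootY] = rootX
--                     self.rank[rootX] += 1
--
--     intervals = list(zip(a, b))
--     uf = UnionFind(N)
--     result = []
--
--     for i in range(N):
--         for j in range(i):
--             a1, b1 = intervals[i]
--             a2, b2 = intervals[j]
--             if not (b1 < a2 or b2 < a1):
--                 uf.union(i, j)
--
--
--         group_count = len(set(uf.find(k) for k in range(i + 1)))
--         result.append(group_count)
--
--     return result
-- ===== SOURCE B (Python) =====
-- def solution(N, a, b):
--     # quick-find: flat label array, merge by relabeling; count = distinct labels
--     intervals = list(zip(a, b))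
--     labels = []
--     result = []
--     for i in range(N):
--         labels.append(i)
--         for j in range(i):
--             ai, bi = intervals[i]
--             aj, bj = intervals[j]
--             if not (bi < aj or bj < ai) and labels[j] != i:
--                 old = labels[j]
--                 labels = [i if t == old else t for t in labels]
--         result.append(len(set(labels)))
--     return result
-- ===== Notes on version B (the rewrite author's own statement) =====
-- stated objective: alternative
-- what changed: Replaced the union-by-rank + path-compression union-find (and its per-step full re-find recount) with a flat quick-find label array: overlapping classes are merged by relabeling and each prefix's component count is the number of distinct labels.
import Mathlib
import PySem

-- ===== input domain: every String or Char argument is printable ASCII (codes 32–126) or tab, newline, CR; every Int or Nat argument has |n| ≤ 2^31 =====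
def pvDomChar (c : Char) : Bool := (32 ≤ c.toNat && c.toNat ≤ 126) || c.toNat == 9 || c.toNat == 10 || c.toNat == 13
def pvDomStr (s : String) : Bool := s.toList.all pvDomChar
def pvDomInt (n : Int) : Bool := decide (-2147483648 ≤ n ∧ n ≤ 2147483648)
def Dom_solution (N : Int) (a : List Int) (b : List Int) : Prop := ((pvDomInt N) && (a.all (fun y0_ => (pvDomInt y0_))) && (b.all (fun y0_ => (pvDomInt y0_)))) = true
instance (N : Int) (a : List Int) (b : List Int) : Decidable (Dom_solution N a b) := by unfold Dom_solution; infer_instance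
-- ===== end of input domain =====

-- B replaces A's union-by-rank + path-compression union-find (plus a per-step re-find recount)
-- by a flat "quick-find" label list merged by relabeling; same return value, no speed claim.

-- ===== PORT A =====
-- UnionFind.find with path compression; the fuel argument only totalizes the recursion
-- (a fuel of n is proved sufficient below on every state the Python program reaches).
def pvFindA : Nat → List Nat → Nat → List Nat × Nat
  | 0, p, x => (p, x)
  | fuel+1, p, x =>
    let px := p.getD x x          -- self.parent[x]; x is in range whenever Python runs this
    if px = x then (p, x)
    else
      let pr := pvFindA fuel p px
      (pr.1.set x pr.2, pr.2)

-- UnionFind.union(x, y): two finds, then link by rank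
def pvUnionA (fuel : Nat) (p rk : List Nat) (x y : Nat) : List Nat × List Nat :=
  let f1 := pvFindA fuel p x
  let f2 := pvFindA fuel f1.1 y
  if f1.2 ≠ f2.2 then
    if rk.getD f1.2 0 > rk.getD f2.2 0 then (f2.1.set f2.2 f1.2, rk)
    else if rk.getD f1.2 0 < rk.getD f2.2 0 then (f2.1.set f1.2 f2.2, rk)
    else (f2.1.set f2.2 f1.2, rk.set f1.2 (rk.getD f1.2 0 + 1))
  else (f2.1, rk)

-- body of "for j in range(i)": overlap test, then uf.union(i, j)
def pvInnerA (n : Nat) (iv : List (Int × Int)) (i : Nat) (q : List Nat × List Nat) (j : Nat) :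
    List Nat × List Nat :=
  let p1 := iv.getD i (0, 0)      -- intervals[i]: in range whenever executed, under Pre_
  let p2 := iv.getD j (0, 0)
  if ¬ (p1.2 < p2.1 ∨ p2.2 < p1.1) then pvUnionA n q.1 q.2 i j else q

-- body of "uf.find(k) for k in range(i + 1)" (mutating generator, collected by set())
def pvCountA (n : Nat) (c : List Nat × List Nat) (k : Nat) : List Nat × List Nat :=
  let fr := pvFindA n c.1 k
  (fr.1, c.2 ++ [fr.2])

-- body of "for i in range(N)"
def pvOuterA (n : Nat) (iv : List (Int × Int)) (st : List Nat × List Nat × List Int) (i : Nat) :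
    List Nat × List Nat × List Int :=
  let inner := (List.range i).foldl (pvInnerA n iv i) (st.1, st.2.1)
  let cf := (List.range (i+1)).foldl (pvCountA n) (inner.1, ([] : List Nat))
  (cf.1, inner.2, st.2.2 ++ [((PySem.Set.ofList cf.2).length : Int)])

def solution (N : Int) (a : List Int) (b : List Int) : List Int :=
  let n := N.toNat
  let iv := a.zip b
  ((List.range n).foldl (pvOuterA n iv)
    (List.range n, List.replicate n 1, ([] : List Int))).2.2

-- ===== PORT B =====
-- quick-find: merge the class labelled labels[j] into label i by relabeling
def pvRelabel (old new : Nat) (ls : List Nat) : List Nat :=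
  ls.map (fun t => if t = old then new else t)

-- body of "for j in range(i)"
def pvInnerB (iv : List (Int × Int)) (i : Nat) (ls : List Nat) (j : Nat) : List Nat :=
  let p1 := iv.getD i (0, 0)
  let p2 := iv.getD j (0, 0)
  if ¬ (p1.2 < p2.1 ∨ p2.2 < p1.1) ∧ ls.getD j 0 ≠ i then pvRelabel (ls.getD j 0) i ls
  else ls

-- body of "for i in range(N)"
def pvOuterB (iv : List (Int × Int)) (st : List Nat × List Int) (i : Nat) :
    List Nat × List Int :=
  let ls := (List.range i).foldl (pvInnerB iv i) (st.1 ++ [i])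
  (ls, st.2 ++ [((PySem.Set.ofList ls).length : Int)])

def solution_alt (N : Int) (a : List Int) (b : List Int) : List Int :=
  let n := N.toNat
  let iv := a.zip b
  ((List.range n).foldl (pvOuterB iv) (([] : List Nat), ([] : List Int))).2

-- ===== PRECONDITION & SPEC =====
-- Pre_ excludes exactly the inputs where Python A raises IndexError: N ≥ 2 with fewer
-- than N zipped interval pairs (intervals[i] is only read when N ≥ 2).
def Pre_solution (N : Int) (a : List Int) (b : List Int) : Prop :=
  N ≤ 1 ∨ N ≤ ((min a.length b.length : Nat) : Int)
instance (N : Int) (a : List Int) (b : List Int) : Decidable (Pre_solution N a b) := by unfold Pre_solution; infer_instance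

def pvWitness_solution : Int × List Int × List Int := (3, [0, 2, 5], [1, 3, 2])

def Spec_solution (N : Int) (a : List Int) (b : List Int) (out : List Int) : Prop := out = solution_alt N a b
instance (N : Int) (a : List Int) (b : List Int) (out : List Int) : Decidable (Spec_solution N a b out) := by unfold Spec_solution; infer_instance

-- ===== CLAIM (what is proved, stated in full; the proofs are below) =====
def Claim_equal_solution : Prop := ∀ (N : Int) (a : List Int) (b : List Int), Dom_solution N a b → Pre_solution N a b → Spec_solution N a b (solution N a b)

-- ===== LEMMAS AND PROOFS =====

-- proof-side view of a parent list: one pointer step, roots, reachability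
def stF (p : List Nat) (x : Nat) : Nat := p.getD x x
def IsRt (p : List Nat) (r : Nat) : Prop := stF p r = r
def Reach (p : List Nat) (x r : Nat) : Prop := ∃ d, (stF p)^[d] x = r ∧ IsRt p r
def SameRt (p : List Nat) (x y : Nat) : Prop := ∃ r, Reach p x r ∧ Reach p y r
def AllRt (p : List Nat) : Prop := ∀ x, ∃ r, Reach p x r
-- the first m cells point below m, everything from m on is untouched
def Cl (m : Nat) (p : List Nat) : Prop :=
  (∀ z, m ≤ z → stF p z = z) ∧ (∀ z, z < m → stF p z < m)

-- the joint invariant: A's parent list p and B's label list ls induce the same partition of 0..m-1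
def InvAB (n m : Nat) (p ls : List Nat) : Prop :=
  p.length = n ∧ m ≤ n ∧ AllRt p ∧ Cl m p ∧ ls.length = m ∧
  (∀ z, z < m → ls.getD z 0 < m) ∧
  (∀ x y, x < m → y < m → (SameRt p x y ↔ ls.getD x 0 = ls.getD y 0))

lemma stF_out (p : List Nat) (z : Nat) (h : p.length ≤ z) : stF p z = z := by
  simp [stF, List.getD, List.getElem?_eq_none (by omega : p.length ≤ z)]

lemma lt_of_stF_ne (p : List Nat) (z : Nat) (h : stF p z ≠ z) : z < p.length := by
  by_contra hc; exact h (stF_out p z (by omega))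

lemma reach_self (p : List Nat) (x : Nat) (h : IsRt p x) : Reach p x x := ⟨0, rfl, h⟩

lemma reach_step (p : List Nat) (x r : Nat) (h : Reach p (stF p x) r) : Reach p x r := by
  obtain ⟨d, hd, hr⟩ := h
  exact ⟨d + 1, by simpa [Function.iterate_succ_apply] using hd, hr⟩

lemma reach_unique (p : List Nat) (x r₁ r₂ : Nat) (h₁ : Reach p x r₁) (h₂ : Reach p x r₂) : r₁ = r₂ := by
  obtain ⟨d₁, hd₁, hr₁⟩ := h₁
  obtain ⟨d₂, hd₂, hr₂⟩ := h₂
  rcases le_total d₁ d₂ with h | h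
  · have : (stF p)^[d₂] x = r₁ := by
      have : (stF p)^[d₂ - d₁ + d₁] x = (stF p)^[d₂ - d₁] ((stF p)^[d₁] x) :=
        Function.iterate_add_apply _ _ _ _
      rw [Nat.sub_add_cancel h] at this
      rw [this, hd₁, Function.iterate_fixed hr₁]
    exact (this.symm.trans hd₂)
  · have : (stF p)^[d₁] x = r₂ := by
      have : (stF p)^[d₁ - d₂ + d₂] x = (stF p)^[d₁ - d₂] ((stF p)^[d₂] x) :=
        Function.iterate_add_apply _ _ _ _
      rw [Nat.sub_add_cancel h] at this
      rw [this, hd₂, Function.iterate_fixed hr₂]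
    exact hd₁.symm.trans this

lemma samert_of_reach (p : List Nat) (u x r : Nat) (hx : Reach p x r) :
    SameRt p u x ↔ Reach p u r := by
  constructor
  · rintro ⟨s, hu, hxs⟩
    rwa [reach_unique p x s r hxs hx] at hu
  · intro hu; exact ⟨r, hu, hx⟩

lemma reach_of_lt (m : Nat) (p : List Nat) (hcl : Cl m p) (x s : Nat) (hx : x < m)
    (h : Reach p x s) : s < m := by
  obtain ⟨d, hd, hr⟩ := h
  induction d generalizing x with
  | zero => simpa [← hd]
  | succ d ih =>
      exact ih (stF p x) (hcl.2 x hx) (by simpa [Function.iterate_succ_apply] using hd)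

lemma iterate_shift (p : List Nat) (x : Nat) (k d : Nat) (hk : k ≤ d) :
    (stF p)^[d] x = (stF p)^[d - k] ((stF p)^[k] x) := by
  rw [← Function.iterate_add_apply, Nat.sub_add_cancel hk]

lemma reach_bound (p : List Nat) (x r : Nat) (h : Reach p x r) :
    ∃ d ≤ p.length, (stF p)^[d] x = r := by
  obtain ⟨d0, hd0, hr⟩ := h
  have hex : ∃ d, (stF p)^[d] x = r := ⟨d0, hd0⟩
  refine ⟨Nat.find hex, ?_, Nat.find_spec hex⟩
  by_contra hgt'
  have hgt : p.length < Nat.find hex := by omega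
  -- before reaching r the walk never sits on a fixpoint
  have hnotroot : ∀ k < Nat.find hex, stF p ((stF p)^[k] x) ≠ (stF p)^[k] x := by
    intro k hk hfix
    have h1 : (stF p)^[Nat.find hex] x = (stF p)^[k] x := by
      rw [iterate_shift p x k _ hk.le, Function.iterate_fixed hfix]
    exact Nat.find_min hex hk (by rw [← h1]; exact Nat.find_spec hex)
  have hlt : ∀ k < Nat.find hex, (stF p)^[k] x < p.length :=
    fun k hk => lt_of_stF_ne p _ (hnotroot k hk)
  -- distinct positions carry distinct nodes
  have haux : ∀ k₁ k₂, k₁ < k₂ → k₂ < Nat.find hex →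
      (stF p)^[k₁] x ≠ (stF p)^[k₂] x := by
    intro k₁ k₂ h12 h2 heq
    have h1 : (stF p)^[Nat.find hex - k₂ + k₁] x = r := by
      have e1 : (stF p)^[Nat.find hex - k₂ + k₁] x
          = (stF p)^[Nat.find hex - k₂] ((stF p)^[k₁] x) := Function.iterate_add_apply _ _ _ _
      have e2 : (stF p)^[Nat.find hex] x
          = (stF p)^[Nat.find hex - k₂] ((stF p)^[k₂] x) := iterate_shift p x k₂ _ h2.le
      rw [e1, heq, ← e2]
      exact Nat.find_spec hex
    exact Nat.find_min hex (by omega) h1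
  have hinj : Function.Injective
      (fun k : Fin (Nat.find hex) => (⟨(stF p)^[k.1] x, hlt k.1 k.2⟩ : Fin p.length)) := by
    intro a b hab
    simp only [Fin.mk.injEq] at hab
    rcases lt_trichotomy a.1 b.1 with h | h | h
    · exact absurd hab (haux a.1 b.1 h b.2)
    · exact Fin.ext h
    · exact absurd hab.symm (haux b.1 a.1 h a.2)
  have := Fintype.card_le_of_injective _ hinj
  simp only [Fintype.card_fin] at this
  omega

lemma stF_set_ne (p : List Nat) (x r z : Nat) (h : z ≠ x) : stF (p.set x r) z = stF p z := by
  simp [stF, List.getD, List.getElem?_set_ne (by omega : x ≠ z)]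

lemma stF_set_self (p : List Nat) (x r : Nat) (h : x < p.length) : stF (p.set x r) x = r := by
  simp [stF, List.getD, List.getElem?_set_self h]

-- compression: redirecting a non-root x to its own root preserves reachability exactly
lemma reach_set_root (p : List Nat) (x r : Nat) (hx : stF p x ≠ x) (hRx : Reach p x r) :
    ∀ y s, Reach (p.set x r) y s ↔ Reach p y s := by
  have hxlen : x < p.length := lt_of_stF_ne p x hx
  obtain ⟨dx, hdx, hrroot⟩ := hRx
  have hRx : Reach p x r := ⟨dx, hdx, hrroot⟩
  have hxr : x ≠ r := fun h => hx (by rw [h]; exact hrroot)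
  have hsne : ∀ z, z ≠ x → stF (p.set x r) z = stF p z := fun z hz => stF_set_ne p x r z hz
  have hsx : stF (p.set x r) x = r := stF_set_self p x r hxlen
  have hroot' : IsRt (p.set x r) r := by
    show stF (p.set x r) r = r
    rw [hsne r (fun h => hxr h.symm)]; exact hrroot
  have fwd : ∀ d y s, (stF p)^[d] y = s → IsRt p s → Reach (p.set x r) y s := by
    intro d
    induction d with
    | zero =>
      intro y s hd hs
      subst hd
      have hyx : y ≠ x := fun h => hx (by rw [← h] at *; exact hs)
      exact reach_self _ y (by show stF _ y = y; rw [hsne y hyx]; exact hs)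
    | succ d ih =>
      intro y s hd hs
      by_cases hy : y = x
      · subst hy
        have : s = r := reach_unique p y s r ⟨d+1, hd, hs⟩ hRx
        subst this
        exact reach_step _ y s (by rw [hsx]; exact reach_self _ s hroot')
      · rw [Function.iterate_succ_apply] at hd
        exact reach_step _ y s (by rw [hsne y hy]; exact ih (stF p y) s hd hs)
  have bwd : ∀ d y s, (stF (p.set x r))^[d] y = s → IsRt (p.set x r) s → Reach p y s := by
    intro d
    induction d with
    | zero =>
      intro y s hd hs
      subst hd
      have hyx : y ≠ x := by
        intro h; subst h
        have : stF (p.set y r) y = y := hs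
        rw [hsx] at this; exact hxr this.symm
      exact reach_self p y (by show stF p y = y; rw [← hsne y hyx]; exact hs)
    | succ d ih =>
      intro y s hd hs
      by_cases hy : y = x
      · subst hy
        rw [Function.iterate_succ_apply, hsx, Function.iterate_fixed hroot'] at hd
        subst hd; exact hRx
      · rw [Function.iterate_succ_apply, hsne y hy] at hd
        exact reach_step p y s (ih (stF p y) s hd hs)
  intro y s
  constructor
  · rintro ⟨d, hd, hs⟩; exact bwd d y s hd hs
  · rintro ⟨d, hd, hs⟩; exact fwd d y s hd hs

-- union: redirecting root r₁ to root r₂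
lemma reach_set_root2 (p : List Nat) (r₁ r₂ : Nat) (h₁ : IsRt p r₁) (h₂ : IsRt p r₂)
    (hne : r₁ ≠ r₂) (hlen : r₁ < p.length) :
    ∀ y s, Reach (p.set r₁ r₂) y s ↔ ((Reach p y s ∧ s ≠ r₁) ∨ (Reach p y r₁ ∧ s = r₂)) := by
  have hsne : ∀ z, z ≠ r₁ → stF (p.set r₁ r₂) z = stF p z := fun z hz => stF_set_ne p r₁ r₂ z hz
  have hs1 : stF (p.set r₁ r₂) r₁ = r₂ := stF_set_self p r₁ r₂ hlen
  have hroot2' : IsRt (p.set r₁ r₂) r₂ := by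
    show stF _ r₂ = r₂; rw [hsne r₂ (Ne.symm hne)]; exact h₂
  have fwd1 : ∀ d y s, (stF p)^[d] y = s → IsRt p s → s ≠ r₁ → Reach (p.set r₁ r₂) y s := by
    intro d
    induction d with
    | zero =>
      intro y s hd hs hsr
      subst hd
      exact reach_self _ y (by show stF _ y = y; rw [hsne y hsr]; exact hs)
    | succ d ih =>
      intro y s hd hs hsr
      have hy : y ≠ r₁ := by
        intro h; subst h
        rw [Function.iterate_succ_apply, h₁, Function.iterate_fixed h₁] at hd
        exact hsr hd.symm
      rw [Function.iterate_succ_apply] at hd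
      exact reach_step _ y s (by rw [hsne y hy]; exact ih (stF p y) s hd hs hsr)
  have fwd2 : ∀ d y, (stF p)^[d] y = r₁ → Reach (p.set r₁ r₂) y r₂ := by
    intro d
    induction d with
    | zero =>
      intro y hd
      simp only [Function.iterate_zero, id_eq] at hd
      subst hd
      exact reach_step _ y r₂ (by rw [hs1]; exact reach_self _ r₂ hroot2')
    | succ d ih =>
      intro y hd
      by_cases hy : y = r₁
      · subst hy
        exact reach_step _ y r₂ (by rw [hs1]; exact reach_self _ r₂ hroot2')
      · rw [Function.iterate_succ_apply] at hd
        exact reach_step _ y r₂ (by rw [hsne y hy]; exact ih (stF p y) hd)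
  have bwd : ∀ d y s, (stF (p.set r₁ r₂))^[d] y = s → IsRt (p.set r₁ r₂) s →
      ((Reach p y s ∧ s ≠ r₁) ∨ (Reach p y r₁ ∧ s = r₂)) := by
    intro d
    induction d with
    | zero =>
      intro y s hd hs
      subst hd
      have hyr : y ≠ r₁ := by
        intro h; subst h
        have : stF (p.set y r₂) y = y := hs
        rw [hs1] at this; exact hne this.symm
      left
      refine ⟨reach_self p y ?_, hyr⟩
      show stF p y = y; rw [← hsne y hyr]; exact hs
    | succ d ih =>
      intro y s hd hs
      by_cases hy : y = r₁
      · subst hy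
        rw [Function.iterate_succ_apply, hs1, Function.iterate_fixed hroot2'] at hd
        subst hd
        exact Or.inr ⟨reach_self p y h₁, rfl⟩
      · rw [Function.iterate_succ_apply, hsne y hy] at hd
        rcases ih (stF p y) s hd hs with ⟨hre, hne'⟩ | ⟨hre, hse⟩
        · exact Or.inl ⟨reach_step p y s hre, hne'⟩
        · exact Or.inr ⟨reach_step p y r₁ hre, hse⟩
  intro y s
  constructor
  · rintro ⟨d, hd, hs⟩; exact bwd d y s hd hs
  · rintro (⟨⟨d, hd, hs⟩, hne'⟩ | ⟨⟨d, hd, _⟩, rfl⟩)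
    · exact fwd1 d y s hd hs hne'
    · exact fwd2 d y hd

lemma cl_of_clause (m : Nat) (p p' : List Nat) (hcl : Cl m p)
    (h : ∀ z, stF p' z = stF p z ∨ (stF p z ≠ z ∧ Reach p z (stF p' z))) : Cl m p' := by
  constructor
  · intro z hz
    rcases h z with h' | ⟨hne, _⟩
    · rw [h', hcl.1 z hz]
    · exact absurd (hcl.1 z hz) hne
  · intro z hz
    rcases h z with h' | ⟨_, hre⟩
    · rw [h']; exact hcl.2 z hz
    · exact reach_of_lt m p hcl z _ hz hre

lemma findA_spec (d fuel : Nat) (p : List Nat) (x r : Nat)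
    (hd : (stF p)^[d] x = r) (hr : IsRt p r) (hfuel : d ≤ fuel) :
    (pvFindA fuel p x).2 = r ∧
    (pvFindA fuel p x).1.length = p.length ∧
    (∀ y s, Reach (pvFindA fuel p x).1 y s ↔ Reach p y s) ∧
    (∀ z, stF (pvFindA fuel p x).1 z = stF p z ∨
      (stF p z ≠ z ∧ Reach p z (stF (pvFindA fuel p x).1 z))) := by
  revert fuel x r
  induction d with
  | zero =>
    intro fuel x r hd hr hfuel
    simp only [Function.iterate_zero, id_eq] at hd
    subst r
    cases fuel with
    | zero => exact ⟨rfl, rfl, fun y s => Iff.rfl, fun z => Or.inl rfl⟩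
    | succ f =>
      have hr' : p.getD x x = x := hr
      have hstep : pvFindA (f+1) p x = (p, x) := by
        simp only [pvFindA]; rw [if_pos hr']
      rw [hstep]
      exact ⟨rfl, rfl, fun y s => Iff.rfl, fun z => Or.inl rfl⟩
  | succ d ih =>
    intro fuel x r hd hr hfuel
    by_cases hpx : stF p x = x
    · have hrx : x = r := by rw [← hd, Function.iterate_fixed hpx]
      cases fuel with
      | zero => omega
      | succ f =>
        have hpx' : p.getD x x = x := hpx
        have hstep : pvFindA (f+1) p x = (p, x) := by
          simp only [pvFindA]; rw [if_pos hpx']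
        rw [hstep]
        exact ⟨hrx, rfl, fun y s => Iff.rfl, fun z => Or.inl rfl⟩
    · cases fuel with
      | zero => omega
      | succ f =>
        have hpx' : ¬ p.getD x x = x := hpx
        have hd' : (stF p)^[d] (stF p x) = r := by
          rw [← Function.iterate_succ_apply]; exact hd
        obtain ⟨ih2, ihlen, ihiff, ihcl⟩ := ih f (stF p x) r hd' hr (by omega)
        have hstep : pvFindA (f+1) p x =
            ((pvFindA f p (stF p x)).1.set x (pvFindA f p (stF p x)).2,
             (pvFindA f p (stF p x)).2) := by
          simp only [pvFindA]; rw [if_neg hpx']; rfl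
        rw [hstep, ih2]
        
        have hxlen : x < p.length := lt_of_stF_ne p x hpx
        have hRx : Reach p x r := ⟨d+1, hd, hr⟩
        have hRx₂ : Reach (pvFindA f p (stF p x)).1 x r := (ihiff x r).mpr hRx
        have hx₂ : stF (pvFindA f p (stF p x)).1 x ≠ x := by
          intro hfix
          have h2 : Reach p x x := (ihiff x x).mp (reach_self _ x hfix)
          have h3 := reach_unique p x x r h2 hRx
          exact hpx (by rw [← h3] at hr; exact hr)
        have hiffset := reach_set_root (pvFindA f p (stF p x)).1 x r hx₂ hRx₂
        refine ⟨rfl, ?_, ?_, ?_⟩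
        · rw [List.length_set, ihlen]
        · intro y s; rw [hiffset y s, ihiff y s]
        · intro z
          by_cases hz : z = x
          · subst hz
            refine Or.inr ⟨hpx, ?_⟩
            have hself : stF ((pvFindA f p (stF p z)).1.set z r) z = r :=
              stF_set_self _ z r (by rw [ihlen]; exact hxlen)
            rw [hself]; exact hRx
          · have hzz : stF ((pvFindA f p (stF p x)).1.set x r) z
                = stF (pvFindA f p (stF p x)).1 z := stF_set_ne _ x r z hz
            rcases ihcl z with h' | ⟨hne, hre⟩
            · exact Or.inl (by rw [hzz, h'])
            · exact Or.inr ⟨hne, by rw [hzz]; exact hre⟩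

lemma unionA_spec (fuel m : Nat) (p rk : List Nat) (x y : Nat)
    (hA : AllRt p) (hcl : Cl m p) (hx : x < m) (hy : y < m) (hm : m ≤ p.length)
    (hfuel : p.length ≤ fuel) :
    (pvUnionA fuel p rk x y).1.length = p.length ∧ AllRt (pvUnionA fuel p rk x y).1 ∧
    Cl m (pvUnionA fuel p rk x y).1 ∧
    (∀ u v, SameRt (pvUnionA fuel p rk x y).1 u v ↔
      (SameRt p u v ∨ ((SameRt p u x ∨ SameRt p u y) ∧ (SameRt p v x ∨ SameRt p v y)))) := by
  obtain ⟨rx, hrx⟩ := hA x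
  have hrootx : IsRt p rx := hrx.choose_spec.2
  obtain ⟨dx, hdxle, hdx⟩ := reach_bound p x rx hrx
  obtain ⟨hf1r, hf1len, hf1iff, hf1cl⟩ :=
    findA_spec dx fuel p x rx hdx hrootx (le_trans hdxle hfuel)
  have hcl1 : Cl m (pvFindA fuel p x).1 := cl_of_clause m p _ hcl hf1cl
  have hA1 : AllRt (pvFindA fuel p x).1 := fun z => by
    obtain ⟨s, hs⟩ := hA z; exact ⟨s, (hf1iff z s).mpr hs⟩
  obtain ⟨ry, hry⟩ := hA y
  have hry1 : Reach (pvFindA fuel p x).1 y ry := (hf1iff y ry).mpr hry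
  have hrooty1 : IsRt (pvFindA fuel p x).1 ry := hry1.choose_spec.2
  obtain ⟨dy, hdyle, hdy⟩ := reach_bound _ y ry hry1
  obtain ⟨hf2r, hf2len, hf2iff, hf2cl⟩ :=
    findA_spec dy fuel _ y ry hdy hrooty1 (by rw [hf1len] at hdyle; omega)
  set p₂ := (pvFindA fuel (pvFindA fuel p x).1 y).1 with hp2
  have hlen2 : p₂.length = p.length := by rw [hf2len, hf1len]
  have hcl2 : Cl m p₂ := cl_of_clause m _ _ hcl1 hf2cl
  have hiff2 : ∀ z s, Reach p₂ z s ↔ Reach p z s := fun z s =>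
    (hf2iff z s).trans (hf1iff z s)
  have hA2 : AllRt p₂ := fun z => by
    obtain ⟨s, hs⟩ := hA z; exact ⟨s, (hiff2 z s).mpr hs⟩
  have hsr2 : ∀ u v, SameRt p₂ u v ↔ SameRt p u v := fun u v =>
    ⟨fun ⟨s, h1, h2⟩ => ⟨s, (hiff2 _ _).mp h1, (hiff2 _ _).mp h2⟩,
     fun ⟨s, h1, h2⟩ => ⟨s, (hiff2 _ _).mpr h1, (hiff2 _ _).mpr h2⟩⟩
  have hrxm : rx < m := reach_of_lt m p hcl x rx hx hrx
  have hrym : ry < m := reach_of_lt m p hcl y ry hy hry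
  have hroot2x : IsRt p₂ rx :=
    ((hiff2 rx rx).mpr (reach_self p rx hrootx)).choose_spec.2
  have hroot2y : IsRt p₂ ry :=
    ((hiff2 ry ry).mpr (reach_self p ry hry.choose_spec.2)).choose_spec.2
  have hux : ∀ u, Reach p₂ u rx ↔ SameRt p u x := fun u =>
    (hiff2 u rx).trans (samert_of_reach p u x rx hrx).symm
  have huy : ∀ u, Reach p₂ u ry ↔ SameRt p u y := fun u =>
    (hiff2 u ry).trans (samert_of_reach p u y ry hry).symm
  by_cases hne : rx = ry
  · have hcond : ¬ ((pvFindA fuel p x).2 ≠ (pvFindA fuel (pvFindA fuel p x).1 y).2) := by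
      rw [hf1r, hf2r]; simp [hne]
    have hu : pvUnionA fuel p rk x y = (p₂, rk) := by
      simp only [pvUnionA]; rw [if_neg hcond]
    rw [hu]
    refine ⟨hlen2, hA2, hcl2, fun u v => ?_⟩
    rw [hsr2 u v]
    constructor
    · exact Or.inl
    · rintro (h | ⟨hu', hv'⟩)
      · exact h
      · have h1 : Reach p u rx := by
          rcases hu' with h' | h'
          · exact (samert_of_reach p u x rx hrx).mp h'
          · rw [hne]; exact (samert_of_reach p u y ry hry).mp h'
        have h2 : Reach p v rx := by
          rcases hv' with h' | h'
          · exact (samert_of_reach p v x rx hrx).mp h'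
          · rw [hne]; exact (samert_of_reach p v y ry hry).mp h'
        exact ⟨rx, h1, h2⟩
  · have hcond : ((pvFindA fuel p x).2 ≠ (pvFindA fuel (pvFindA fuel p x).1 y).2) := by
      rw [hf1r, hf2r]; exact hne
    -- all three rank branches set a root to a root; a uniform argument covers them
    have main : ∀ rA rB, (rA = rx ∧ rB = ry) ∨ (rA = ry ∧ rB = rx) →
        (p₂.set rA rB).length = p.length ∧ AllRt (p₂.set rA rB) ∧ Cl m (p₂.set rA rB) ∧
        (∀ u v, SameRt (p₂.set rA rB) u v ↔
          (SameRt p u v ∨ ((SameRt p u x ∨ SameRt p u y) ∧ (SameRt p v x ∨ SameRt p v y)))) := by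
      intro rA rB hor
      have hrootA : IsRt p₂ rA := by rcases hor with ⟨h1, _⟩ | ⟨h1, _⟩ <;> subst h1 <;> assumption
      have hrootB : IsRt p₂ rB := by rcases hor with ⟨_, h1⟩ | ⟨_, h1⟩ <;> subst h1 <;> assumption
      have hABne : rA ≠ rB := by
        rcases hor with ⟨h1, h2⟩ | ⟨h1, h2⟩
        · subst h1; subst h2; exact hne
        · subst h1; subst h2; exact Ne.symm hne
      have hAm : rA < m := by rcases hor with ⟨h1, _⟩ | ⟨h1, _⟩ <;> subst h1 <;> assumption
      have hBm : rB < m := by rcases hor with ⟨_, h1⟩ | ⟨_, h1⟩ <;> subst h1 <;> assumption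
      have hAlen : rA < p₂.length := by rw [hlen2]; omega
      have hch := reach_set_root2 p₂ rA rB hrootA hrootB hABne hAlen
      refine ⟨by rw [List.length_set, hlen2], ?_, ?_, ?_⟩
      · intro z
        obtain ⟨s, hs⟩ := hA2 z
        by_cases hsA : s = rA
        · exact ⟨rB, (hch z rB).mpr (Or.inr ⟨hsA ▸ hs, rfl⟩)⟩
        · exact ⟨s, (hch z s).mpr (Or.inl ⟨hs, hsA⟩)⟩
      · constructor
        · intro z hz
          have hzA : z ≠ rA := by omega
          rw [stF_set_ne p₂ rA rB z hzA]; exact hcl2.1 z hz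
        · intro z hz
          by_cases hzA : z = rA
          · subst hzA; rw [stF_set_self p₂ z rB hAlen]; exact hBm
          · rw [stF_set_ne p₂ rA rB z hzA]; exact hcl2.2 z hz
      · intro u v
        have hchar : SameRt (p₂.set rA rB) u v ↔
            (SameRt p₂ u v ∨ ((Reach p₂ u rA ∨ Reach p₂ u rB) ∧ (Reach p₂ v rA ∨ Reach p₂ v rB))) := by
          constructor
          · rintro ⟨s, hu', hv'⟩
            rcases (hch u s).mp hu' with ⟨hus, hsne⟩ | ⟨hurA, hseq⟩
            · rcases (hch v s).mp hv' with ⟨hvs, _⟩ | ⟨hvrA, hseq⟩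
              · exact Or.inl ⟨s, hus, hvs⟩
              · rw [hseq] at hus
                exact Or.inr ⟨Or.inr hus, Or.inl hvrA⟩
            · rw [hseq] at hv'
              rcases (hch v rB).mp hv' with ⟨hvs, _⟩ | ⟨hvrA, _⟩
              · exact Or.inr ⟨Or.inl hurA, Or.inr hvs⟩
              · exact Or.inr ⟨Or.inl hurA, Or.inl hvrA⟩
          · rintro (⟨s, hu', hv'⟩ | ⟨hu', hv'⟩)
            · by_cases hsA : s = rA
              · subst hsA
                exact ⟨rB, (hch u rB).mpr (Or.inr ⟨hu', rfl⟩),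
                       (hch v rB).mpr (Or.inr ⟨hv', rfl⟩)⟩
              · exact ⟨s, (hch u s).mpr (Or.inl ⟨hu', hsA⟩),
                       (hch v s).mpr (Or.inl ⟨hv', hsA⟩)⟩
            · have hc : ∀ w, (Reach p₂ w rA ∨ Reach p₂ w rB) → Reach (p₂.set rA rB) w rB := by
                intro w hw
                rcases hw with hw | hw
                · exact (hch w rB).mpr (Or.inr ⟨hw, rfl⟩)
                · exact (hch w rB).mpr (Or.inl ⟨hw, Ne.symm hABne⟩)
              exact ⟨rB, hc u hu', hc v hv'⟩
        have hOR : ∀ w, (Reach p₂ w rA ∨ Reach p₂ w rB) ↔ (SameRt p w x ∨ SameRt p w y) := by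
          intro w
          rcases hor with ⟨h1, h2⟩ | ⟨h1, h2⟩
          · subst h1; subst h2; rw [hux w, huy w]
          · subst h1; subst h2; rw [hux w, huy w]; exact Or.comm
        rw [hchar, hsr2 u v, hOR u, hOR v]
    by_cases hgt : rk.getD (pvFindA fuel p x).2 0 > rk.getD (pvFindA fuel (pvFindA fuel p x).1 y).2 0
    · have hu : pvUnionA fuel p rk x y = (p₂.set (pvFindA fuel (pvFindA fuel p x).1 y).2 (pvFindA fuel p x).2, rk) := by
        simp only [pvUnionA]; rw [if_pos hcond, if_pos hgt]
      rw [hu, hf1r, hf2r]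
      exact main ry rx (Or.inr ⟨rfl, rfl⟩)
    · by_cases hlt : rk.getD (pvFindA fuel p x).2 0 < rk.getD (pvFindA fuel (pvFindA fuel p x).1 y).2 0
      · have hu : pvUnionA fuel p rk x y = (p₂.set (pvFindA fuel p x).2 (pvFindA fuel (pvFindA fuel p x).1 y).2, rk) := by
          simp only [pvUnionA]; rw [if_pos hcond, if_neg hgt, if_pos hlt]
        rw [hu, hf1r, hf2r]
        exact main rx ry (Or.inl ⟨rfl, rfl⟩)
      · have hu : pvUnionA fuel p rk x y = (p₂.set (pvFindA fuel (pvFindA fuel p x).1 y).2 (pvFindA fuel p x).2,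
            rk.set (pvFindA fuel p x).2 (rk.getD (pvFindA fuel p x).2 0 + 1)) := by
          simp only [pvUnionA]; rw [if_pos hcond, if_neg hgt, if_neg hlt]
        rw [hu, hf1r, hf2r]
        exact main ry rx (Or.inr ⟨rfl, rfl⟩)

lemma countfold_spec (fuel : Nat) (ks : List Nat) (p : List Nat) (acc : List Nat)
    (hA : AllRt p) (hfuel : p.length ≤ fuel) :
    (ks.foldl (pvCountA fuel) (p, acc)).1.length = p.length ∧
    (∀ y s, Reach (ks.foldl (pvCountA fuel) (p, acc)).1 y s ↔ Reach p y s) ∧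
    (∀ m, Cl m p → Cl m (ks.foldl (pvCountA fuel) (p, acc)).1) ∧
    ∃ rts : List Nat,
      (ks.foldl (pvCountA fuel) (p, acc)).2 = acc ++ rts ∧
      rts.length = ks.length ∧
      ∀ idx, idx < ks.length → Reach p (ks.getD idx 0) (rts.getD idx 0) := by
  induction ks generalizing p acc with
  | nil =>
    refine ⟨rfl, fun y s => Iff.rfl, fun m h => h, [], by simp, rfl, ?_⟩
    intro idx h
    simp at h
  | cons k ks ih =>
    obtain ⟨r, hr⟩ := hA k
    have hroot : IsRt p r := hr.choose_spec.2
    obtain ⟨d, hdle, hd⟩ := reach_bound p k r hr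
    obtain ⟨hfr, hflen, hfiff, hfcl⟩ := findA_spec d fuel p k r hd hroot (le_trans hdle hfuel)
    have hstep : pvCountA fuel (p, acc) k = ((pvFindA fuel p k).1, acc ++ [r]) := by
      simp only [pvCountA, hfr]
    have hA1 : AllRt (pvFindA fuel p k).1 := fun z => by
      obtain ⟨s, hs⟩ := hA z; exact ⟨s, (hfiff z s).mpr hs⟩
    have hfuel1 : (pvFindA fuel p k).1.length ≤ fuel := by rw [hflen]; exact hfuel
    obtain ⟨ihlen, ihiff, ihcl, rts', ih2, ihlen', ihpt⟩ := ih _ (acc ++ [r]) hA1 hfuel1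
    rw [List.foldl_cons, hstep]
    refine ⟨by rw [ihlen, hflen], ?_, ?_, r :: rts', ?_, by simp [ihlen'], ?_⟩
    · intro y s; rw [ihiff y s, hfiff y s]
    · intro m hm
      exact ihcl m (cl_of_clause m p _ hm hfcl)
    · rw [ih2, List.append_assoc]; rfl
    · intro idx hidx
      cases idx with
      | zero => simpa using hr
      | succ idx =>
        have h := ihpt idx (by simpa using hidx)
        simp only [List.getD_cons_succ]
        exact (hfiff _ _).mp h

lemma mem_iff_getD (l : List Nat) (a : Nat) : a ∈ l ↔ ∃ k, k < l.length ∧ l.getD k 0 = a := by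
  rw [List.mem_iff_getElem]
  constructor
  · rintro ⟨n, h, rfl⟩
    exact ⟨n, h, List.getD_eq_getElem l 0 h⟩
  · rintro ⟨k, h, hk⟩
    exact ⟨k, h, by rw [← List.getD_eq_getElem l 0 h, hk]⟩

-- len(set(l)) counts the distinct values of l
lemma setLen (l : List Nat) : (PySem.Set.ofList l).length = l.toFinset.card := by
  have hnd : (PySem.Set.ofList l).Nodup := PySem.Set.nodup_ofList l
  have hts : (PySem.Set.ofList l).toFinset = l.toFinset := by
    ext a
    simp only [List.mem_toFinset]
    exact PySem.Set.mem_ofList l a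
  rw [← hts, List.toFinset_card_of_nodup hnd]

-- equal numbers of distinct values in two equally long lists whose equality patterns agree
lemma ofList_length_eq (l₁ l₂ : List Nat) (hlen : l₁.length = l₂.length)
    (hiff : ∀ k₁ k₂, k₁ < l₁.length → k₂ < l₁.length →
      (l₁.getD k₁ 0 = l₁.getD k₂ 0 ↔ l₂.getD k₁ 0 = l₂.getD k₂ 0)) :
    (PySem.Set.ofList l₁).length = (PySem.Set.ofList l₂).length := by
  rw [setLen l₁, setLen l₂]
  induction l₁ generalizing l₂ with
  | nil =>
    cases l₂ with
    | nil => rfl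
    | cons y t₂ => simp at hlen
  | cons x t₁ ih =>
    cases l₂ with
    | nil => simp at hlen
    | cons y t₂ =>
      have hlen' : t₁.length = t₂.length := by simpa using hlen
      have hx : x ∈ t₁ ↔ y ∈ t₂ := by
        rw [mem_iff_getD t₁ x, mem_iff_getD t₂ y]
        constructor
        · rintro ⟨k, hk, hget⟩
          refine ⟨k, by omega, ?_⟩
          have h := hiff 0 (k+1) (by simp) (by simp; omega)
          simp only [List.getD_cons_zero, List.getD_cons_succ] at h
          exact (h.mp hget.symm).symm
        · rintro ⟨k, hk, hget⟩
          refine ⟨k, by omega, ?_⟩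
          have h := hiff 0 (k+1) (by simp) (by simp; omega)
          simp only [List.getD_cons_zero, List.getD_cons_succ] at h
          exact (h.mpr hget.symm).symm
      have htail : ∀ k₁ k₂, k₁ < t₁.length → k₂ < t₁.length →
          (t₁.getD k₁ 0 = t₁.getD k₂ 0 ↔ t₂.getD k₁ 0 = t₂.getD k₂ 0) := by
        intro k₁ k₂ h1 h2
        have h := hiff (k₁+1) (k₂+1) (by simp; omega) (by simp; omega)
        simpa only [List.getD_cons_succ] using h
      have ihc := ih t₂ hlen' htail
      simp only [List.toFinset_cons]
      by_cases hmem : x ∈ t₁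
      · rw [Finset.insert_eq_self.mpr (List.mem_toFinset.mpr hmem),
            Finset.insert_eq_self.mpr (List.mem_toFinset.mpr (hx.mp hmem)), ihc]
      · rw [Finset.card_insert_of_notMem (fun hc => hmem (List.mem_toFinset.mp hc)),
            Finset.card_insert_of_notMem
              (fun hc => (fun h => hmem (hx.mpr h)) (List.mem_toFinset.mp hc)), ihc]

lemma samert_congr (p p' : List Nat) (h : ∀ y s, Reach p' y s ↔ Reach p y s) :
    ∀ u v, SameRt p' u v ↔ SameRt p u v := fun _ _ =>
  ⟨fun ⟨s, h1, h2⟩ => ⟨s, (h _ _).mp h1, (h _ _).mp h2⟩,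
   fun ⟨s, h1, h2⟩ => ⟨s, (h _ _).mpr h1, (h _ _).mpr h2⟩⟩

lemma relabel_len (old new : Nat) (ls : List Nat) : (pvRelabel old new ls).length = ls.length := by
  simp [pvRelabel]

lemma relabel_getD (old new : Nat) (ls : List Nat) (k : Nat) (hk : k < ls.length) :
    (pvRelabel old new ls).getD k 0 = if ls.getD k 0 = old then new else ls.getD k 0 := by
  have h1 : (pvRelabel old new ls).getD k 0
      = (pvRelabel old new ls)[k]'(by rw [relabel_len]; exact hk) :=
    List.getD_eq_getElem _ 0 _
  have h2 : ls.getD k 0 = ls[k]'hk := List.getD_eq_getElem _ 0 hk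
  rw [h1, h2]
  simp [pvRelabel]

lemma inner_step (n : Nat) (iv : List (Int × Int)) (i j : Nat) (hin : i + 1 ≤ n) (hj : j < i + 1)
    (q : List Nat × List Nat) (ls : List Nat)
    (hInv : InvAB n (i+1) q.1 ls) (hlsi : ls.getD i 0 = i) :
    InvAB n (i+1) (pvInnerA n iv i q j).1 (pvInnerB iv i ls j) ∧
    (pvInnerB iv i ls j).getD i 0 = i := by
  obtain ⟨hplen, hmn, hA, hcl, hlslen, hbound, hiff⟩ := hInv
  by_cases hC : ¬ ((iv.getD i (0,0)).2 < (iv.getD j (0,0)).1 ∨ (iv.getD j (0,0)).2 < (iv.getD i (0,0)).1)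
  · have hA_eq : pvInnerA n iv i q j = pvUnionA n q.1 q.2 i j := by
      simp only [pvInnerA]; rw [if_pos hC]
    obtain ⟨hulen, huA, hucl, huiff⟩ :=
      unionA_spec n (i+1) q.1 q.2 i j hA hcl (by omega) hj
        (by rw [hplen]; exact hin) (by rw [hplen])
    by_cases hL : ls.getD j 0 ≠ i
    · have hB_eq : pvInnerB iv i ls j = pvRelabel (ls.getD j 0) i ls := by
        simp only [pvInnerB]; rw [if_pos ⟨hC, hL⟩]
      rw [hA_eq, hB_eq]
      refine ⟨⟨by rw [hulen, hplen], hmn, huA, hucl, by rw [relabel_len, hlslen], ?_, ?_⟩, ?_⟩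
      · intro z hz
        rw [relabel_getD _ _ _ z (by omega)]
        split_ifs with h
        · omega
        · exact hbound z hz
      · intro x y hx hy
        rw [huiff x y, hiff x y hx hy, hiff x i hx (by omega), hiff x j hx hj,
            hiff y i hy (by omega), hiff y j hy hj, hlsi,
            relabel_getD _ _ _ x (by omega), relabel_getD _ _ _ y (by omega)]
        split_ifs <;> omega
      · rw [relabel_getD _ _ _ i (by omega), hlsi]
        split_ifs <;> rfl
    · have hB_eq : pvInnerB iv i ls j = ls := by
        simp only [pvInnerB]; rw [if_neg (fun hc => hL hc.2)]
      rw [hA_eq, hB_eq]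
      refine ⟨⟨by rw [hulen, hplen], hmn, huA, hucl, hlslen, hbound, ?_⟩, hlsi⟩
      intro x y hx hy
      have hL' : ls.getD j 0 = i := by omega
      rw [huiff x y, hiff x y hx hy, hiff x i hx (by omega), hiff x j hx hj,
          hiff y i hy (by omega), hiff y j hy hj, hlsi, hL']
      omega
  · have hA_eq : pvInnerA n iv i q j = q := by
      simp only [pvInnerA]; rw [if_neg hC]
    have hB_eq : pvInnerB iv i ls j = ls := by
      simp only [pvInnerB]; rw [if_neg (fun hc => hC hc.1)]
    rw [hA_eq, hB_eq]
    exact ⟨⟨hplen, hmn, hA, hcl, hlslen, hbound, hiff⟩, hlsi⟩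

lemma inner_prefix (n : Nat) (iv : List (Int × Int)) (i : Nat) (hin : i + 1 ≤ n) :
    ∀ (js : List Nat) (q : List Nat × List Nat) (ls : List Nat),
    (∀ j ∈ js, j < i + 1) →
    InvAB n (i+1) q.1 ls → ls.getD i 0 = i →
    InvAB n (i+1) (js.foldl (pvInnerA n iv i) q).1 (js.foldl (pvInnerB iv i) ls) ∧
    (js.foldl (pvInnerB iv i) ls).getD i 0 = i := by
  intro js
  induction js with
  | nil => intro q ls _ hInv hlsi; exact ⟨hInv, hlsi⟩
  | cons j js ih =>
    intro q ls hjs hInv hlsi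
    obtain ⟨h1, h2⟩ := inner_step n iv i j hin (hjs j (by simp)) q ls hInv hlsi
    simpa using ih (pvInnerA n iv i q j) (pvInnerB iv i ls j)
      (fun j' hj' => hjs j' (by simp [hj'])) h1 h2

lemma stF_range (n z : Nat) : stF (List.range n) z = z := by
  by_cases h : z < n
  · have h' : z < (List.range n).length := by simpa using h
    rw [stF, List.getD_eq_getElem _ z h', List.getElem_range]
  · exact stF_out _ z (by simpa using h)

lemma getD_append_lt (l : List Nat) (a : Nat) (k : Nat) (hk : k < l.length) :
    (l ++ [a]).getD k 0 = l.getD k 0 := by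
  rw [List.getD_eq_getElem _ 0 (by simp; omega), List.getD_eq_getElem _ 0 hk,
      List.getElem_append_left hk]

lemma getD_append_len (l : List Nat) (a : Nat) : (l ++ [a]).getD l.length 0 = a := by
  rw [List.getD_eq_getElem _ 0 (by simp)]
  simp

lemma getD_range (n k : Nat) (h : k < n) : (List.range n).getD k 0 = k := by
  rw [List.getD_eq_getElem _ 0 (by simpa using h), List.getElem_range]

lemma inv_extend (n i : Nat) (p ls : List Nat) (hi : i + 1 ≤ n) (hInv : InvAB n i p ls) :
    InvAB n (i+1) p (ls ++ [i]) ∧ (ls ++ [i]).getD i 0 = i := by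
  obtain ⟨hplen, hmn, hA, hcl, hlslen, hbound, hiff⟩ := hInv
  have hrooti : IsRt p i := hcl.1 i le_rfl
  have hgi : (ls ++ [i]).getD i 0 = i := by
    have h := getD_append_len ls i
    rwa [hlslen] at h
  have hcl' : Cl (i+1) p := by
    constructor
    · intro z hz; exact hcl.1 z (by omega)
    · intro z hz
      by_cases h : z < i
      · have := hcl.2 z h; omega
      · have hz' : z = i := by omega
        subst hz'; rw [hrooti]; omega
  refine ⟨⟨hplen, by omega, hA, hcl', by simp [hlslen], ?_, ?_⟩, hgi⟩
  · intro z hz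
    by_cases h : z < i
    · rw [getD_append_lt ls i z (by omega)]
      have := hbound z h; omega
    · have hz' : z = i := by omega
      subst hz'; rw [hgi]; omega
  · intro x y hx hy
    by_cases hxi : x < i <;> by_cases hyi : y < i
    · rw [getD_append_lt ls i x (by omega), getD_append_lt ls i y (by omega)]
      exact hiff x y hxi hyi
    · have hy' : y = i := by omega
      rw [hy', getD_append_lt ls i x (by omega), hgi]
      refine iff_of_false ?_ ?_
      · rintro ⟨s, hxs, hys⟩
        have hsi : s = i := reach_unique p i s i hys (reach_self p i hrooti)
        rw [hsi] at hxs
        exact absurd (reach_of_lt i p hcl x i hxi hxs) (by omega)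
      · intro hL
        have := hbound x hxi; omega
    · have hx' : x = i := by omega
      rw [hx', getD_append_lt ls i y (by omega), hgi]
      refine iff_of_false ?_ ?_
      · rintro ⟨s, hxs, hys⟩
        have hsi : s = i := reach_unique p i s i hxs (reach_self p i hrooti)
        rw [hsi] at hys
        exact absurd (reach_of_lt i p hcl y i hyi hys) (by omega)
      · intro hL
        have := hbound y hyi; omega
    · have hx' : x = i := by omega
      have hy' : y = i := by omega
      rw [hx', hy', hgi]
      exact iff_of_true ⟨i, reach_self p i hrooti, reach_self p i hrooti⟩ rfl

lemma outer_prefix (n : Nat) (iv : List (Int × Int)) (i : Nat) (hi : i ≤ n) :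
    InvAB n i
      ((List.range i).foldl (pvOuterA n iv) (List.range n, List.replicate n 1, ([] : List Int))).1
      ((List.range i).foldl (pvOuterB iv) (([] : List Nat), ([] : List Int))).1 ∧
    ((List.range i).foldl (pvOuterA n iv) (List.range n, List.replicate n 1, ([] : List Int))).2.2 =
      ((List.range i).foldl (pvOuterB iv) (([] : List Nat), ([] : List Int))).2 := by
  induction i with
  | zero =>
    constructor
    · refine ⟨by simp, by omega, ?_, ?_, ?_, ?_, ?_⟩
      · exact fun z => ⟨z, reach_self _ z (stF_range n z)⟩
      · exact ⟨fun z _ => stF_range n z, fun z hz => absurd hz (by omega)⟩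
      · rfl
      · intro z hz; exact absurd hz (by omega)
      · intro x y hx _; exact absurd hx (by omega)
    · rfl
  | succ i ih =>
    have hi' : i ≤ n := by omega
    obtain ⟨hInv, hres⟩ := ih hi'
    simp only [List.range_succ, List.foldl_append, List.foldl_cons, List.foldl_nil]
    set stA := (List.range i).foldl (pvOuterA n iv)
      (List.range n, List.replicate n 1, ([] : List Int)) with hstA
    set stB := (List.range i).foldl (pvOuterB iv) (([] : List Nat), ([] : List Int)) with hstB
    set lsB := (List.range i).foldl (pvInnerB iv i) (stB.1 ++ [i]) with hlsB
    set qA := (List.range i).foldl (pvInnerA n iv i) (stA.1, stA.2.1) with hqA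
    have hA1 : (pvOuterA n iv stA i).1 =
        ((List.range (i+1)).foldl (pvCountA n) (qA.1, ([] : List Nat))).1 := rfl
    have hA2 : (pvOuterA n iv stA i).2.2 = stA.2.2 ++
        [(((PySem.Set.ofList ((List.range (i+1)).foldl (pvCountA n) (qA.1, ([] : List Nat))).2).length : Nat) : Int)] := rfl
    have hB1 : (pvOuterB iv stB i).1 = lsB := rfl
    have hB2 : (pvOuterB iv stB i).2 = stB.2 ++ [(((PySem.Set.ofList lsB).length : Nat) : Int)] := rfl
    rw [hA1, hA2, hB1, hB2]
    obtain ⟨hInv1, hgi⟩ := inv_extend n i stA.1 stB.1 (by omega) hInv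
    obtain ⟨hInv2, hgi2⟩ := inner_prefix n iv i (by omega) (List.range i) (stA.1, stA.2.1)
      (stB.1 ++ [i]) (fun j hj => by have := List.mem_range.mp hj; omega) hInv1 hgi
    rw [← hqA] at hInv2
    rw [← hlsB] at hInv2 hgi2
    obtain ⟨hqlen, _, hqAll, hqcl, hlsBlen, hlsBbound, hqiff⟩ := hInv2
    obtain ⟨hclen, hciff, hccl, rts, hcf2, hrtslen, hrtspt⟩ :=
      countfold_spec n (List.range (i+1)) qA.1 [] hqAll (by rw [hqlen])
    have hcfInv : InvAB n (i+1) ((List.range (i+1)).foldl (pvCountA n) (qA.1, ([] : List Nat))).1 lsB := by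
      refine ⟨by rw [hclen, hqlen], by omega, ?_, hccl (i+1) hqcl, hlsBlen, hlsBbound, ?_⟩
      · intro z
        obtain ⟨s, hs⟩ := hqAll z
        exact ⟨s, (hciff z s).mpr hs⟩
      · intro x y hx hy
        exact (samert_congr _ _ hciff x y).trans (hqiff x y hx hy)
    have hcnt : (PySem.Set.ofList ((List.range (i+1)).foldl (pvCountA n) (qA.1, ([] : List Nat))).2).length
        = (PySem.Set.ofList lsB).length := by
      rw [hcf2]
      simp only [List.nil_append]
      apply ofList_length_eq rts lsB
      · rw [hrtslen, hlsBlen]; simp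
      · intro k₁ k₂ h1 h2
        have hk1 : k₁ < i+1 := by rw [hrtslen] at h1; simpa using h1
        have hk2 : k₂ < i+1 := by rw [hrtslen] at h2; simpa using h2
        have hr1 := hrtspt k₁ (by simpa using hk1)
        have hr2 := hrtspt k₂ (by simpa using hk2)
        rw [getD_range (i+1) k₁ hk1] at hr1
        rw [getD_range (i+1) k₂ hk2] at hr2
        constructor
        · intro he
          exact (hqiff k₁ k₂ hk1 hk2).mp ⟨rts.getD k₁ 0, hr1, by rw [he]; exact hr2⟩
        · intro he
          obtain ⟨s, h1', h2'⟩ := (hqiff k₁ k₂ hk1 hk2).mpr he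
          rw [← reach_unique _ k₁ s _ h1' hr1, ← reach_unique _ k₂ s _ h2' hr2]
    exact ⟨hcfInv, by rw [hres, hcnt]⟩

-- ===== VERDICT (by name: the statement is the Claim_ definition above) =====
theorem solution_spec : Claim_equal_solution := by
  intro N a b _ _
  unfold Spec_solution solution solution_alt
  exact (outer_prefix N.toNat (a.zip b) N.toNat le_rfl).2
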